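-- pv_equiv track=rewrite | github.com/zentrum-lexikographie/wordprofile | query/moduls/drawTable.py | calculate_first
-- ===== SOURCE A (Python) =====
-- def fill(count, strObj):
--     strResult = ''
--     for i in range(0, count):
--         strResult = strResult + strObj
--     return strResult
--
-- def calculate_first(listLength):
--     strResult = '┌─'
--     iCounter = 0
--     for i in listLength:
--         strToken = fill(listLength[iCounter], '─')
--
--         if iCounter == len(listLength) - 1:
--             strResult = strResult + strToken + '─┐'
--         else:
--             strResult = strResult + strToken + '─┬─'
--         iCounter = iCounter + 1
--     return strResult
--     pass
-- ===== SOURCE B (Python) =====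
-- def calculate_first(listLength):
--     return '┌' + '┬'.join('─' * w + '──' for w in listLength) + '┐'
-- ===== Notes on version B (the rewrite author's own statement) =====
-- stated objective: simpler
-- what changed: Replaces the counter-indexed loop with last-element branching and the hand-rolled fill() repetition helper by a single join over per-column dash segments built with string multiplication.
-- intended difference: On the empty list A's loop never runs and it returns the unbalanced leftover initial string '┌─', while B returns the closed empty border '┌┐', which is the intended value for a table with zero columns. — e.g. on calculate_first([]): A returns "┌─", B returns "┌┐"
import Mathlib
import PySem

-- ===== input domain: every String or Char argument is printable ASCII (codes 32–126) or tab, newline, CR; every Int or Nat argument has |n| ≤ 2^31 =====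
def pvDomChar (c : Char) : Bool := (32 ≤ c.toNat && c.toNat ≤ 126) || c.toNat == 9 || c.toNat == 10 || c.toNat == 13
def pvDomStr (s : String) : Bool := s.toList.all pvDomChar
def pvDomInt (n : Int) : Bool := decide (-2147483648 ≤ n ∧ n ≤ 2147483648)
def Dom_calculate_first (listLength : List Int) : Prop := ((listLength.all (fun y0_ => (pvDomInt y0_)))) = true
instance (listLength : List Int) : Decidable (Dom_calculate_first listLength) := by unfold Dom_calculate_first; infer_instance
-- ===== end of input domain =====

-- B replaces A's counter-indexed loop (with a last-element branch and a hand-rolled fill() repetition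
-- helper) by a single separator-join over per-column dash segments; on the empty list B returns the
-- balanced border "┌┐" where A returns its leftover initial "┌─" (stated as the intended difference D_).


-- ===== PORT A =====
-- fill(count, strObj): repeated concatenation over range(0, count)
def fillA (count : Int) (strObj : String) : String :=
  (PySem.List.pyRange 0 count 1).foldl (fun strResult _ => strResult ++ strObj) ""

-- literal port of A: fold over listLength with state (strResult, iCounter);
-- listLength[iCounter] is always in range while the loop runs, so the .getD 0 default is never used
def calculate_first (listLength : List Int) : String :=
  (listLength.foldl (fun (st : String × Int) _ =>
      let strToken := fillA ((PySem.List.pyGet? listLength st.2).getD 0) "─"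
      if st.2 == (listLength.length : Int) - 1 then
        (st.1 ++ strToken ++ "─┐", st.2 + 1)
      else
        (st.1 ++ strToken ++ "─┬─", st.2 + 1))
    ("┌─", (0 : Int))).1

-- ===== PORT B =====
-- '─' * w  (Python string repetition; empty for w ≤ 0)
def segB (w : Int) : String := String.ofList (PySem.List.pyRepeat ['─'] w) ++ "──"

-- port of B: '┌' + '┬'.join('─' * w + '──' for w in listLength) + '┐'
def calculate_first_alt (listLength : List Int) : String :=
  "┌" ++ PySem.Str.join "┬" (listLength.map segB) ++ "┐"

-- ===== PRECONDITION & SPEC =====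
-- On the empty list A returns its unbalanced leftover initial string "┌─" (the loop never runs),
-- while B returns the closed empty border "┌┐", the intended value for a table with zero columns.
def D_calculate_first (listLength : List Int) : Prop := listLength = []
instance (listLength : List Int) : Decidable (D_calculate_first listLength) := by unfold D_calculate_first; infer_instance

def Spec_calculate_first (listLength : List Int) (out : String) : Prop := ¬ D_calculate_first listLength → out = calculate_first_alt listLength
instance (listLength : List Int) (out : String) : Decidable (Spec_calculate_first listLength out) := by unfold Spec_calculate_first; infer_instance

def pvDiffWitness_calculate_first : List Int := []
def pvDiffWitnessOut_calculate_first : String × String := ("┌─", "┌┐")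

-- ===== CLAIM (what is proved, stated in full; the proofs are below) =====
def Claim_unchanged_calculate_first : Prop := ∀ (listLength : List Int), Dom_calculate_first listLength → Spec_calculate_first listLength (calculate_first listLength)
def Claim_changed_calculate_first : Prop := Dom_calculate_first (pvDiffWitness_calculate_first) ∧ D_calculate_first (pvDiffWitness_calculate_first) ∧ calculate_first (pvDiffWitness_calculate_first) = pvDiffWitnessOut_calculate_first.1 ∧ calculate_first_alt (pvDiffWitness_calculate_first) = pvDiffWitnessOut_calculate_first.2 ∧ pvDiffWitnessOut_calculate_first.1 ≠ pvDiffWitnessOut_calculate_first.2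
def Claim_exact_calculate_first : Prop := ∀ (listLength : List Int), Dom_calculate_first listLength → D_calculate_first listLength → calculate_first listLength ≠ calculate_first_alt listLength

-- ===== LEMMAS AND PROOFS =====

def dashL (w : Int) : List Char := List.replicate w.toNat '─'

-- what A's loop appends to the accumulator over the remaining (nonempty) suffix
def renderA : List Int → List Char
  | [] => []
  | [w] => dashL w ++ ['─', '┐']
  | w :: rest => dashL w ++ ['─', '┬', '─'] ++ renderA rest

lemma foldl_append_repeat (l : List Int) (acc : String) :
    (l.foldl (fun s _ => s ++ "─") acc).toList = acc.toList ++ List.replicate l.length '─' := by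
  induction l generalizing acc with
  | nil => simp
  | cons x xs ih =>
      simp [List.foldl_cons, ih, List.replicate_succ]

lemma fillA_data (c : Int) : (fillA c "─").toList = dashL c := by
  simpa [fillA, dashL, PySem.List.length_pyRange_one] using
    foldl_append_repeat (PySem.List.pyRange 0 c 1) ""

lemma segB_data (w : Int) : (segB w).toList = dashL w ++ ['─', '─'] := by
  simp [segB, dashL, PySem.List.pyRepeat_singleton]

lemma dash_swap (w : Int) : '─' :: dashL w = dashL w ++ ['─'] := by
  simp [dashL, ← List.replicate_succ, List.replicate_succ']

lemma loopA (L : List Int) (ys : List Int) (k : Nat) (acc : String)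
    (hdrop : ys = L.drop k) (hne : ys ≠ []) :
    ((ys.foldl (fun (st : String × Int) _ =>
        let strToken := fillA ((PySem.List.pyGet? L st.2).getD 0) "─"
        if st.2 == (L.length : Int) - 1 then
          (st.1 ++ strToken ++ "─┐", st.2 + 1)
        else
          (st.1 ++ strToken ++ "─┬─", st.2 + 1))
      (acc, ((k : Nat) : Int))).1).toList = acc.toList ++ renderA ys := by
  induction ys generalizing k acc with
  | nil => exact absurd rfl hne
  | cons w tail ih =>
      have hk : k < L.length := by
        rcases Nat.lt_or_ge k L.length with h | h
        · exact h
        · simp [List.drop_eq_nil_of_le h] at hdrop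
      have hget : L[k] = w := by
        have := congrArg (fun l => l.headD 0) hdrop
        simpa [List.headD_eq_head?, List.head?_drop, List.getElem?_eq_getElem hk] using this.symm
      have hgetI : (PySem.List.pyGet? L ((k : Nat) : Int)).getD 0 = w := by
        simp [PySem.List.pyGet?_natCast, List.getElem?_eq_getElem hk, hget]
      have hlenL := congrArg List.length hdrop
      simp [List.length_drop] at hlenL
      cases tail with
      | nil =>
          have hlast : (((k : Nat) : Int) == (L.length : Int) - 1) = true := by
            simp at hlenL ⊢
            omega
          rw [List.foldl_cons]
          simp only [hlast, if_pos, hgetI]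
          simp [renderA, fillA_data]
      | cons v rest =>
          have hnotlast : (((k : Nat) : Int) == (L.length : Int) - 1) = false := by
            simp at hlenL ⊢
            omega
          have hdrop' : v :: rest = L.drop (k + 1) := by
            have := congrArg List.tail hdrop
            simpa [List.tail_drop] using this
          have ihx := ih (k := k + 1)
            (acc := acc ++ fillA ((PySem.List.pyGet? L ((k : Nat) : Int)).getD 0) "─" ++ "─┬─")
            hdrop' (by simp)
          rw [List.foldl_cons]
          simp only [hnotlast, Bool.false_eq_true, if_false]
          push_cast at ihx
          rw [ihx]
          simp [renderA, fillA_data, List.getElem?_eq_getElem hk, hget]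

lemma render_join (ys : List Int) (hne : ys ≠ []) :
    '─' :: renderA ys = (PySem.Str.join "┬" (ys.map segB)).toList ++ ['┐'] := by
  induction ys with
  | nil => exact absurd rfl hne
  | cons w tail ih =>
      cases tail with
      | nil =>
          have key : '─' :: (dashL w ++ ['─', '┐']) = (dashL w ++ ['─', '─']) ++ ['┐'] := by
            have := dash_swap w
            rw [show ('─' :: (dashL w ++ ['─', '┐'])) = ('─' :: dashL w) ++ ['─', '┐'] from rfl, this]
            simp
          rw [show renderA [w] = dashL w ++ ['─', '┐'] from by simp [renderA]]
          rw [key]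
          simp [PySem.Str.toList_join, PySem.Chars.join_singleton, segB_data]
      | cons v rest =>
          have ihx := ih (by simp)
          have hjoin : (PySem.Str.join "┬" ((w :: v :: rest).map segB)).toList
              = (segB w).toList ++ '┬' :: (PySem.Str.join "┬" ((v :: rest).map segB)).toList := by
            simp [PySem.Str.toList_join, PySem.Chars.join_cons_cons]
          calc '─' :: renderA (w :: v :: rest)
              = ('─' :: dashL w) ++ ['─', '┬'] ++ ('─' :: renderA (v :: rest)) := by
                simp [renderA]
            _ = (dashL w ++ ['─', '─']) ++ '┬' :: ((PySem.Str.join "┬" ((v :: rest).map segB)).toList ++ ['┐']) := by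
                rw [dash_swap, ihx]; simp
            _ = (PySem.Str.join "┬" ((w :: v :: rest).map segB)).toList ++ ['┐'] := by
                rw [hjoin, segB_data]; simp

lemma main_eq (xs : List Int) (hne : xs ≠ []) :
    calculate_first xs = calculate_first_alt xs := by
  have hloop := loopA xs xs 0 "┌─" (by simp) hne
  have hjoin := render_join xs hne
  push_cast at hloop
  apply String.ext
  unfold calculate_first calculate_first_alt
  rw [hloop]
  simp only [String.toList_append]
  rw [show ("┌" : String).toList = ['┌'] from rfl,
      show ("┐" : String).toList = ['┐'] from rfl]
  simpa using congrArg (fun l => '┌' :: l) hjoin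

-- ===== VERDICT (by name: the statement is the Claim_ definition above) =====
theorem calculate_first_spec : Claim_unchanged_calculate_first := by
  intro xs _ hD
  exact main_eq xs hD

theorem calculate_first_changed : Claim_changed_calculate_first := by
  unfold Claim_changed_calculate_first; decide

theorem calculate_first_tight : Claim_exact_calculate_first := by
  intro xs _ hD
  subst hD
  decide
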